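-- pv_equiv track=rewrite | github.com/HiteshRepo/learning-gist | DSAlgo/Arrays/array_union_intersecion.py | array_union_intersecion
-- ===== SOURCE A (Python) =====
-- def array_union_intersecion(arr1, arr2):
--
--     set1 = set(arr1 + arr2)
--     u_i = []
--
--     for i in arr1:
--         if i in arr2 and i not in u_i:
--             u_i.append(i)
--
--     union = len(set1)
--     intersection = len(u_i)
--     ui = [union, intersection]
--     return ui
-- ===== SOURCE B (Python) =====
-- def array_union_intersecion(arr1, arr2):
--     union = len(set(arr1 + arr2))
--     intersection = len(set(arr1)) + len(set(arr2)) - union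
--     return [union, intersection]
-- ===== Notes on version B (the rewrite author's own statement) =====
-- stated objective: faster
-- what changed: The nested membership scan building a dedupe list is replaced by the inclusion-exclusion identity |A|+|B|-|A∪B| over set cardinalities, so the intersection size is a closed-form arithmetic expression with no loop.
import Mathlib
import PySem

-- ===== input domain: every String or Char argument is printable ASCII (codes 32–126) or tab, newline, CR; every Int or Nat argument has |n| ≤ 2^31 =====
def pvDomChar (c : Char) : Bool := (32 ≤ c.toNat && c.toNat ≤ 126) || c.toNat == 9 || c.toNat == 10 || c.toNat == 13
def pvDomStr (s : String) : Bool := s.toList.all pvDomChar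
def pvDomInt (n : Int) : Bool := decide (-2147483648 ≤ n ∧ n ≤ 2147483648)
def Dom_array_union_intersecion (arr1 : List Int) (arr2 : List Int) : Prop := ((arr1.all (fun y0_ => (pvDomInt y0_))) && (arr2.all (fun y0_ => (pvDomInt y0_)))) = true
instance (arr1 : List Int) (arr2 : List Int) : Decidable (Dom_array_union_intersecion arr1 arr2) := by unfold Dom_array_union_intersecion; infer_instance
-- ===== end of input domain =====

-- B replaces A's nested membership scan by the inclusion-exclusion identity
-- |A|+|B|-|A∪B| for the intersection size (objective: faster, O(n+m) vs O(n·m) intersection scan in a timing run).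

-- ===== PORT A =====
def array_union_intersecion (arr1 : List Int) (arr2 : List Int) : List Int :=
  let set1 : PySem.Set Int := PySem.Set.ofList (arr1 ++ arr2)
  let u_i : List Int :=
    arr1.foldl (fun u_i i => if i ∈ arr2 ∧ i ∉ u_i then u_i ++ [i] else u_i) []
  let union : Int := set1.length
  let intersection : Int := u_i.length
  [union, intersection]

-- ===== PORT B =====
def array_union_intersecion_alt (arr1 : List Int) (arr2 : List Int) : List Int :=
  let union : Int := (PySem.Set.ofList (arr1 ++ arr2)).length
  let intersection : Int :=
    ((PySem.Set.ofList arr1).length : Int) + ((PySem.Set.ofList arr2).length : Int) - union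
  [union, intersection]

-- ===== PRECONDITION & SPEC =====
def Spec_array_union_intersecion (arr1 : List Int) (arr2 : List Int) (out : List Int) : Prop := out = array_union_intersecion_alt arr1 arr2
instance (arr1 : List Int) (arr2 : List Int) (out : List Int) : Decidable (Spec_array_union_intersecion arr1 arr2 out) := by unfold Spec_array_union_intersecion; infer_instance

-- ===== CLAIM (what is proved, stated in full; the proofs are below) =====
def Claim_equal_array_union_intersecion : Prop := ∀ (arr1 : List Int) (arr2 : List Int), Dom_array_union_intersecion arr1 arr2 → Spec_array_union_intersecion arr1 arr2 (array_union_intersecion arr1 arr2)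

-- ===== LEMMAS AND PROOFS =====

theorem aui_loop_mem (arr2 l : List Int) (acc : List Int) (x : Int) :
    x ∈ l.foldl (fun u_i i => if i ∈ arr2 ∧ i ∉ u_i then u_i ++ [i] else u_i) acc ↔
      x ∈ acc ∨ (x ∈ l ∧ x ∈ arr2) := by
  induction l generalizing acc with
  | nil => simp
  | cons i l ih =>
    simp only [List.foldl_cons, ih, List.mem_cons]
    by_cases h : i ∈ arr2 ∧ i ∉ acc
    · simp only [if_pos h, List.mem_append, List.mem_singleton]
      constructor
      · rintro ((ha | rfl) | hl) <;> tauto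
      · rintro (ha | ⟨(rfl | hl), hb⟩) <;> tauto
    · simp only [if_neg h]
      push Not at h
      constructor
      · tauto
      · rintro (ha | ⟨(rfl | hl), hb⟩) <;> tauto

theorem aui_loop_nodup (arr2 l : List Int) (acc : List Int) (h : acc.Nodup) :
    (l.foldl (fun u_i i => if i ∈ arr2 ∧ i ∉ u_i then u_i ++ [i] else u_i) acc).Nodup := by
  induction l generalizing acc with
  | nil => simpa
  | cons i l ih =>
    simp only [List.foldl_cons]
    by_cases hc : i ∈ arr2 ∧ i ∉ acc
    · rw [if_pos hc]
      refine ih _ ?_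
      simp only [List.nodup_append, List.nodup_singleton, h, true_and]
      intro a ha b hb
      simp only [List.mem_singleton] at hb
      subst hb
      exact fun heq => hc.2 (heq ▸ ha)
    · rw [if_neg hc]
      exact ih _ h

theorem ofList_length_eq_card (xs : List Int) :
    (PySem.Set.ofList xs).length = xs.toFinset.card := by
  have hnd : (PySem.Set.ofList xs).Nodup := PySem.Set.nodup_ofList xs
  have := List.toFinset_card_of_nodup hnd
  rw [← this]
  congr 1
  ext x
  simp [PySem.Set.mem_ofList]

-- ===== VERDICT (by name: the statement is the Claim_ definition above) =====
theorem array_union_intersecion_spec : Claim_equal_array_union_intersecion := by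
  intro arr1 arr2 _
  unfold Spec_array_union_intersecion array_union_intersecion array_union_intersecion_alt
  simp only []
  congr 1
  congr 1
  -- remaining: intersection lengths agree
  set f := fun (u_i : List Int) (i : Int) => if i ∈ arr2 ∧ i ∉ u_i then u_i ++ [i] else u_i with hf
  have hmem : ∀ x, x ∈ arr1.foldl f [] ↔ x ∈ arr1 ∧ x ∈ arr2 := by
    intro x; rw [hf, aui_loop_mem]; simp
  have hnd : (arr1.foldl f []).Nodup := aui_loop_nodup arr2 arr1 [] List.nodup_nil
  have hlen : (arr1.foldl f []).length = (arr1.toFinset ∩ arr2.toFinset).card := by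
    rw [← List.toFinset_card_of_nodup hnd]
    congr 1
    ext x
    simp [hmem]
  have hu : (PySem.Set.ofList (arr1 ++ arr2)).length = (arr1.toFinset ∪ arr2.toFinset).card := by
    rw [ofList_length_eq_card]; congr 1; simp [List.toFinset_append]
  have hkey := Finset.card_inter_add_card_union arr1.toFinset arr2.toFinset
  rw [ofList_length_eq_card arr1, ofList_length_eq_card arr2, hu, hlen]
  omega
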